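-- pv_equiv track=rewrite | github.com/YuJieQiu0823712/python_practice | leetcode/Dynamic_programming/dynamicProgrammingMedium.py | twoKeysKeyboard650
-- ===== SOURCE A (Python) =====
-- def twoKeysKeyboard650(n: int) -> int:
--     """
--     Calculates the minimum number of operations needed to print exactly `n` 'A's on a notepad
--     using two operations: Copy All and Paste.
--
--     Args:
--         n (int): The number of 'A's to print.
--
--     Returns:
--         int: Minimum number of operations to reach `n` 'A's.
--
--     Approach:
--         - Use dynamic programming.
--         - `dp[i]` is the minimum number of steps to get i 'A's.
--         - Initialize dp[i] = i (worst case: paste one 'A' at a time).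
--         - For each number i from 2 to n, iterate backwards through its divisors.
--         If `i` is divisible by `j`, set `dp[i] = dp[j] + i // j`:
--             - dp[j] to build up to j 'A's,
--             - one "Copy All" and `i // j - 1` "Paste" operations.
--
--     TC: O(n^2)
--     SC: O(n)
--     """
--     dp = [i for i in range(n+1)]
--     dp[1] = 0
--
--     for curr_n in range(2,n+1):
--         for curr_chars_can_be_copied_and_pasted in range(curr_n//2, 1, -1):
--             if curr_n % curr_chars_can_be_copied_and_pasted == 0:
--                 dp[curr_n] = dp[curr_chars_can_be_copied_and_pasted] + curr_n//curr_chars_can_be_copied_and_pasted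
--                 break
--     return dp[n]
-- ===== SOURCE B (Python) =====
-- def twoKeysKeyboard650(n: int) -> int:
--     # min ops = sum of prime factors of n (with multiplicity), by trial division up to sqrt(n)
--     total = 0
--     m = n
--     d = 2
--     while d * d <= m:
--         if m % d == 0:
--             total += d
--             m //= d
--         else:
--             d += 1
--     if m > 1:
--         total += m
--     return total
-- ===== Notes on version B (the rewrite author's own statement) =====
-- stated objective: faster
-- what changed: Replaces the O(n^2) DP table (for each i, scan i//2..2 for a divisor) with direct summation of n's prime factors by trial division up to sqrt(n); the DP value dp[i] equals the sum of i's prime factors with multiplicity.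
-- outside the precondition, e.g. on twoKeysKeyboard650(0): A raises IndexError, B returns 0
import Mathlib
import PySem

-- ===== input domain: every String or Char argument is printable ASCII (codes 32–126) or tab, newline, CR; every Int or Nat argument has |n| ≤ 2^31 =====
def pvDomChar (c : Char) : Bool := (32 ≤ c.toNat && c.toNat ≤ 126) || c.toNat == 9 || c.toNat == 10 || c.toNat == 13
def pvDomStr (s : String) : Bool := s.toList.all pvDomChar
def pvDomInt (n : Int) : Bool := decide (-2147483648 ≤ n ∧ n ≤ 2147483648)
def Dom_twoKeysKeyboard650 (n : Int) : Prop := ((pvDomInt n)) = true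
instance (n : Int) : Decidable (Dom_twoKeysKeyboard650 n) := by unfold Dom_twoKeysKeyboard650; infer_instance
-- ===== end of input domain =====

-- B replaces A's O(n^2) DP with trial-division summation of n's prime factors (asymptotically faster; for n ≥ 1 A's dp[n] is exactly that sum).

-- ===== PORT A =====
-- body of the 'for curr_n' loop: scan curr_n//2 .. 2 for the first divisor, then break (the loop's
-- only effect is at the break iteration, so the scan-with-break is find? over the descending range)
def stepA (dp : List Int) (c : Int) : List Int :=
  match (PySem.List.pyRange (PySem.Int.floordiv c 2) 1 (-1)).find?
      (fun j => PySem.Int.mod c j == 0) with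
  | some j => PySem.List.pySetD dp c (PySem.List.pyGetD dp j 0 + PySem.Int.floordiv c j)
  | none => dp

-- dp = [i for i in range(n+1)]; dp[1] = 0   (the assignment raises IndexError for n ≤ 0: see Pre_)
def dpA0 (n : Int) : List Int := PySem.List.pySetD (PySem.List.pyRange 0 (n + 1) 1) 1 0

def twoKeysKeyboard650 (n : Int) : Int :=
  PySem.List.pyGetD ((PySem.List.pyRange 2 (n + 1) 1).foldl stepA (dpA0 n)) n 0

-- ===== PORT B =====
-- the while loop of Source B: while d*d <= m, divide out d or advance d; then add m if m > 1.
-- (the '2 ≤ d' conjunct only makes the recursion total for arguments the entry point never produces)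
def bTrial (d m total : Nat) : Nat :=
  if h : 2 ≤ d ∧ d * d ≤ m then
    if m % d = 0 then bTrial d (m / d) (total + d)
    else bTrial (d + 1) m total
  else if 1 < m then total + m else total
termination_by (m, m + 1 - d)
decreasing_by
· exact Prod.Lex.left _ _ (Nat.div_lt_self (by nlinarith [h.1, h.2]) (by omega))
· have hdm : d ≤ m := le_trans (Nat.le_mul_of_pos_left d (by omega)) h.2
  exact Prod.Lex.right _ (by omega)

def twoKeysKeyboard650_alt (n : Int) : Int := ((bTrial 2 n.toNat 0 : Nat) : Int)

-- ===== PRECONDITION & SPEC =====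
-- Python A raises IndexError at 'dp[1] = 0' whenever n ≤ 0 (dp then has fewer than 2 entries)
def Pre_twoKeysKeyboard650 (n : Int) : Prop := 1 ≤ n
instance (n : Int) : Decidable (Pre_twoKeysKeyboard650 n) := by unfold Pre_twoKeysKeyboard650; infer_instance
def pvWitness_twoKeysKeyboard650 : Int := 6

def Spec_twoKeysKeyboard650 (n : Int) (out : Int) : Prop := out = twoKeysKeyboard650_alt n
instance (n : Int) (out : Int) : Decidable (Spec_twoKeysKeyboard650 n out) := by unfold Spec_twoKeysKeyboard650; infer_instance

-- ===== CLAIM (what is proved, stated in full; the proofs are below) =====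
def Claim_equal_twoKeysKeyboard650 : Prop := ∀ (n : Int), Dom_twoKeysKeyboard650 n → Pre_twoKeysKeyboard650 n → Spec_twoKeysKeyboard650 n (twoKeysKeyboard650 n)

-- ===== LEMMAS AND PROOFS =====

-- the common value: the sum of the prime factors of m, with multiplicity
def sfSum (m : Nat) : Nat :=
  if _h : 2 ≤ m then m.minFac + sfSum (m / m.minFac) else 0
termination_by m
decreasing_by exact Nat.div_lt_self (by omega) (Nat.minFac_prime (by omega)).two_le

lemma sfSum_le_one {m : Nat} (h : m ≤ 1) : sfSum m = 0 := by
  rw [sfSum]; simp [Nat.not_le.mpr (by omega : m < 2)]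

lemma sfSum_two_le {m : Nat} (h : 2 ≤ m) : sfSum m = m.minFac + sfSum (m / m.minFac) := by
  rw [sfSum]; simp [h]

lemma sfSum_prime {m : Nat} (h : m.Prime) : sfSum m = m := by
  rw [sfSum_two_le h.two_le, h.minFac_eq, Nat.div_self h.pos, sfSum_le_one (by omega)]; omega

-- ===== B side: bTrial computes sfSum =====
lemma bTrial_eq : ∀ (d m total : Nat), 2 ≤ d →
    (∀ p : Nat, p.Prime → p ∣ m → d ≤ p) →
    bTrial d m total = total + sfSum m := by
  intro d m total
  induction d, m, total using bTrial.induct with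
  | case1 d m total h hmod ih =>
    intro hd hmin
    have hdvd : d ∣ m := Nat.dvd_of_mod_eq_zero hmod
    have hm4 : 4 ≤ m := le_trans (by nlinarith [h.1] : 4 ≤ d * d) h.2
    have hpmin : m.minFac = d := by
      have h1 : m.minFac ≤ d := Nat.minFac_le_of_dvd h.1 hdvd
      have h2 : d ≤ m.minFac := hmin m.minFac (Nat.minFac_prime (by omega)) (Nat.minFac_dvd m)
      omega
    rw [bTrial]
    simp only [h, and_self, dif_pos, hmod, if_pos]
    rw [ih hd (fun p hp hpd => hmin p hp (hpd.trans (Nat.div_dvd_of_dvd hdvd)))]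
    conv_rhs => rw [sfSum_two_le (show 2 ≤ m by omega)]
    rw [hpmin]
    omega
  | case2 d m total h hmod ih =>
    intro hd hmin
    rw [bTrial]
    simp only [h, and_self, dif_pos, hmod, if_false]
    rw [ih (by omega) ?_]
    intro p hp hpd
    have := hmin p hp hpd
    rcases Nat.lt_or_ge d p with h' | h'
    · omega
    · have : p = d := by omega
      subst this
      obtain ⟨k, rfl⟩ := hpd
      simp [Nat.mul_mod_right] at hmod
  | case3 d m total h hm =>
    intro hd hmin
    have hprime : m.Prime := by
      by_contra hnp
      have hsq : m.minFac * m.minFac ≤ m := by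
        have := Nat.minFac_sq_le_self (by omega) hnp
        simpa [pow_two] using this
      have hge : d ≤ m.minFac := hmin m.minFac (Nat.minFac_prime (by omega)) (Nat.minFac_dvd m)
      have : d * d ≤ m := le_trans (Nat.mul_le_mul hge hge) hsq
      exact h ⟨hd, this⟩
    rw [bTrial, dif_neg h, if_pos hm, sfSum_prime hprime]
  | case4 d m total h hm =>
    intro hd hmin
    rw [bTrial, dif_neg h, if_neg hm, sfSum_le_one (by omega)]; omega

lemma alt_eq (n : Int) : twoKeysKeyboard650_alt n = (sfSum n.toNat : Int) := by
  unfold twoKeysKeyboard650_alt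
  rw [bTrial_eq 2 n.toNat 0 (le_refl 2) (fun p hp _ => hp.two_le), Nat.zero_add]

-- ===== descending ranges: range(a, 1, -1) =====
lemma pyRange_down_eq (a : Int) :
    PySem.List.pyRange a 1 (-1) = (List.range (a - 1).toNat).map (fun k : Nat => a - (k : Int)) := by
  unfold PySem.List.pyRange
  rw [if_neg (by norm_num : ¬(-1:Int) = 0), if_neg (by norm_num : ¬(0:Int) < -1)]
  dsimp only
  split_ifs with h
  · have h1 : (a - 1 + - -1 - 1) / - -1 = a - 1 := by norm_num
    rw [h1]
    apply List.map_congr_left; intro k _; ring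
  · have h0 : (a - 1).toNat = 0 := by omega
    rw [h0]
    simp

lemma mem_pyRange_down {a x : Int} :
    x ∈ PySem.List.pyRange a 1 (-1) ↔ 1 < x ∧ x ≤ a := by
  rw [pyRange_down_eq]
  simp only [List.mem_map, List.mem_range]
  constructor
  · rintro ⟨k, hk, rfl⟩; omega
  · rintro ⟨h1, h2⟩; exact ⟨(a - x).toNat, by omega, by omega⟩

lemma pyRange_down_cons {a : Int} (h : 2 ≤ a) :
    PySem.List.pyRange a 1 (-1) = a :: PySem.List.pyRange (a - 1) 1 (-1) := by
  rw [pyRange_down_eq, pyRange_down_eq]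
  have h1 : (a - 1).toNat = (a - 1 - 1).toNat + 1 := by omega
  rw [h1, List.range_succ_eq_map]
  simp only [List.map_cons, List.map_map]
  congr 1
  · simp
  · apply List.map_congr_left; intro k _; simp [Function.comp]; omega

lemma find_desc_none (a : Int) (p : Int → Bool)
    (h : ∀ x : Int, 1 < x → x ≤ a → p x = false) :
    (PySem.List.pyRange a 1 (-1)).find? p = none := by
  rw [List.find?_eq_none]
  intro x hx
  rcases mem_pyRange_down.mp hx with ⟨h1, h2⟩
  simp [h x h1 h2]

lemma find_desc_some (p : Int → Bool) (j : Int) (hj : 1 < j) (hpj : p j = true) :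
    ∀ a : Int, j ≤ a → (∀ x : Int, j < x → x ≤ a → p x = false) →
      (PySem.List.pyRange a 1 (-1)).find? p = some j := by
  intro a
  induction h : (a - j).toNat generalizing a with
  | zero =>
    intro hja hmax
    have : a = j := by omega
    subst this
    rw [pyRange_down_cons (by omega), List.find?_cons_of_pos hpj]
  | succ k ih =>
    intro hja hmax
    have h2a : 2 ≤ a := by omega
    rw [pyRange_down_cons h2a, List.find?_cons_of_neg (by simp [hmax a (by omega) le_rfl])]
    exact ih (a - 1) (by omega) (by omega) (fun x hx _hxa => hmax x hx (by omega))

-- ===== A's inner scan finds c / minFac c (nothing, for prime c) =====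
lemma floordiv_cast_two (c : Nat) : PySem.Int.floordiv (c : Int) 2 = ((c / 2 : Nat) : Int) := by
  exact_mod_cast PySem.Int.floordiv_natCast c 2

lemma findA_prime {c : Nat} (hc : c.Prime) :
    (PySem.List.pyRange (PySem.Int.floordiv (c : Int) 2) 1 (-1)).find?
      (fun j => PySem.Int.mod (c : Int) j == 0) = none := by
  rw [floordiv_cast_two]
  apply find_desc_none
  intro x h1 h2
  simp only [beq_eq_false_iff_ne, ne_eq]
  rw [PySem.Int.mod_eq_zero_iff_dvd]
  intro hdvd
  have hx : x = ((x.toNat : Nat) : Int) := by omega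
  rw [hx] at hdvd
  have hy : x.toNat ∣ c := Int.natCast_dvd_natCast.mp hdvd
  rcases (Nat.Prime.eq_one_or_self_of_dvd hc _ hy) with h | h
  · omega
  · have : c / 2 < c := Nat.div_lt_self hc.pos (by omega)
    omega

lemma findA_composite {c : Nat} (h2 : 2 ≤ c) (hc : ¬ c.Prime) :
    (PySem.List.pyRange (PySem.Int.floordiv (c : Int) 2) 1 (-1)).find?
      (fun j => PySem.Int.mod (c : Int) j == 0) = some ((c / c.minFac : Nat) : Int) := by
  have hp : c.minFac.Prime := Nat.minFac_prime (by omega)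
  have hpd : c.minFac ∣ c := Nat.minFac_dvd c
  have hsq : c.minFac * c.minFac ≤ c := by
    have := Nat.minFac_sq_le_self (by omega) hc
    simpa [pow_two] using this
  have hq2 : c.minFac ≤ c / c.minFac := (Nat.le_div_iff_mul_le hp.pos).mpr hsq
  have hq2' : 2 ≤ c / c.minFac := le_trans hp.two_le hq2
  have hqhalf : c / c.minFac ≤ c / 2 := Nat.div_le_div_left hp.two_le (by omega)
  rw [floordiv_cast_two]
  apply find_desc_some
  · exact_mod_cast hq2'
  · simp only [beq_iff_eq]
    rw [PySem.Int.mod_eq_zero_iff_dvd]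
    exact_mod_cast Int.natCast_dvd_natCast.mpr (Nat.div_dvd_of_dvd hpd)
  · exact_mod_cast hqhalf
  · intro x hqx hxc
    simp only [beq_eq_false_iff_ne, ne_eq]
    rw [PySem.Int.mod_eq_zero_iff_dvd]
    intro hdvd
    have hx : x = ((x.toNat : Nat) : Int) := by omega
    rw [hx] at hdvd
    have hy : x.toNat ∣ c := Int.natCast_dvd_natCast.mp hdvd
    set y := x.toNat with hyy
    have hyhalf : y ≤ c / 2 := by omega
    have hqy : c / c.minFac < y := by omega
    have h2y : 2 * y ≤ c := by
      calc 2 * y ≤ 2 * (c / 2) := by omega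
      _ ≤ c := by omega
    have hcy2 : 2 ≤ c / y := (Nat.le_div_iff_mul_le (by omega)).mpr (by omega)
    have hcyd : c / y ∣ c := Nat.div_dvd_of_dvd hy
    have hple : c.minFac ≤ c / y := Nat.minFac_le_of_dvd hcy2 hcyd
    have hyq : y ≤ c / c.minFac := by
      have h1 : c / (c / y) ≤ c / c.minFac := Nat.div_le_div_left hple hp.pos
      rwa [Nat.div_div_self hy (by omega)] at h1
    omega

-- ===== A side: the dp invariant =====
lemma dpA0_eq (N : Nat) :
    dpA0 (N : Int) = ((List.range (N + 1)).map (fun k : Nat => (k : Int))).set 1 0 := by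
  unfold dpA0
  rw [PySem.List.pySetD_of_nonneg _ _ (show (0:Int) ≤ 1 by norm_num)]
  have h1 : ((N : Int) + 1) = ((N + 1 : Nat) : Int) := by push_cast; ring
  rw [h1, PySem.List.pyRange_zero]
  norm_num

lemma dpA0_length (N : Nat) : (dpA0 (N : Int)).length = N + 1 := by
  rw [dpA0_eq]; simp

lemma dpA0_getD (N i : Nat) (hi : i ≤ N) :
    (dpA0 (N : Int)).getD i 0 = if i = 1 then 0 else (i : Int) := by
  rw [dpA0_eq]
  rw [List.getD_eq_getElem?_getD, List.getElem?_set]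
  by_cases h : i = 1
  · subst h
    rw [if_pos rfl, if_pos (by simpa using (by omega : 1 < N + 1))]
    rfl
  · rw [if_neg (by omega)]
    simp [List.getElem?_map, List.getElem?_range (by omega : i < N + 1), h]

lemma getD_set_self (xs : List Int) (n : Nat) (v : Int) (h : n < xs.length) :
    (xs.set n v).getD n 0 = v := by
  rw [List.getD_eq_getElem?_getD, List.getElem?_set, if_pos rfl, if_pos h]
  rfl

lemma getD_set_ne (xs : List Int) (n m : Nat) (v : Int) (h : n ≠ m) :
    (xs.set n v).getD m 0 = xs.getD m 0 := by
  rw [List.getD_eq_getElem?_getD, List.getElem?_set, if_neg h, ← List.getD_eq_getElem?_getD]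

lemma dp_inv (N : Nat) (_hn : 1 ≤ N) :
    ∀ k : Nat, 1 ≤ k → k ≤ N →
      (((PySem.List.pyRange 2 ((k : Int) + 1) 1).foldl stepA (dpA0 (N : Int))).length = N + 1) ∧
      (∀ i : Nat, i ≤ N →
        ((PySem.List.pyRange 2 ((k : Int) + 1) 1).foldl stepA (dpA0 (N : Int))).getD i 0
          = if i ≤ k then (sfSum i : Int) else (i : Int)) := by
  intro k
  induction k with
  | zero => omega
  | succ k ih =>
    intro _ hkN
    by_cases hk1 : k = 0
    · -- k+1 = 1 : the loop range 2..2 is empty, dp is dpA0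
      subst hk1
      have hempty : PySem.List.pyRange 2 (((1 : Nat) : Int) + 1) 1 = [] := by
        rw [PySem.List.pyRange_one]; norm_num
      rw [hempty]
      simp only [List.foldl_nil]
      refine ⟨dpA0_length N, ?_⟩
      intro i hi
      rw [dpA0_getD N i hi]
      by_cases h0 : i = 0
      · subst h0; simp [sfSum_le_one]
      · by_cases h1 : i = 1
        · subst h1; simp [sfSum_le_one]
        · rw [if_neg h1, if_neg (by omega)]
    · -- k ≥ 1 : peel the last iteration, c = k+1
      have hk1' : 1 ≤ k := by omega
      obtain ⟨hlen, hget⟩ := ih hk1' (by omega)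
      have hcons : PySem.List.pyRange 2 (((k + 1 : Nat) : Int) + 1) 1
          = PySem.List.pyRange 2 ((k : Int) + 1) 1 ++ [(k : Int) + 1] := by
        have h1 : (((k + 1 : Nat) : Int) + 1) = ((k : Int) + 1) + 1 := by push_cast; ring
        rw [h1, PySem.List.pyRange_one_succ_right (by omega)]
      rw [hcons, List.foldl_append, List.foldl_cons, List.foldl_nil]
      set dpk := (PySem.List.pyRange 2 ((k : Int) + 1) 1).foldl stepA (dpA0 (N : Int)) with hdpk
      have hcast : ((k : Int) + 1) = ((k + 1 : Nat) : Int) := by push_cast; ring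
      unfold stepA
      rw [hcast]
      by_cases hp : (k + 1).Prime
      · rw [findA_prime hp]
        refine ⟨hlen, ?_⟩
        intro i hi
        rw [hget i hi]
        by_cases hik : i ≤ k
        · rw [if_pos hik, if_pos (by omega)]
        · rw [if_neg hik]
          by_cases hik1 : i ≤ k + 1
          · have : i = k + 1 := by omega
            subst this
            rw [if_pos (by omega), sfSum_prime hp]
          · rw [if_neg hik1]
      · rw [findA_composite (by omega) hp]
        dsimp only
        have hpd : (k + 1).minFac ∣ (k + 1) := Nat.minFac_dvd _
        have hp2 : 2 ≤ (k + 1).minFac := (Nat.minFac_prime (by omega)).two_le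
        set q := (k + 1) / (k + 1).minFac with hq
        have hqk : q ≤ k := by
          have : q ≤ (k + 1) / 2 := Nat.div_le_div_left hp2 (by omega)
          omega
        have hcq : (k + 1) / q = (k + 1).minFac := by
          rw [hq, Nat.div_div_self hpd (by omega)]
        rw [PySem.List.pyGetD_natCast, PySem.List.pySetD_natCast]
        have hfd : PySem.Int.floordiv ((k + 1 : Nat) : Int) ((q : Nat) : Int)
            = (((k + 1) / q : Nat) : Int) := by
          exact_mod_cast PySem.Int.floordiv_natCast (k + 1) q
        rw [hfd, hcq]
        refine ⟨by simp [hlen], ?_⟩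
        intro i hi
        rw [hget q (by omega)]
        rw [if_pos hqk]
        by_cases hik1 : i = k + 1
        · subst hik1
          rw [getD_set_self _ _ _ (by omega)]
          rw [if_pos (by omega)]
          have : sfSum (k + 1) = (k + 1).minFac + sfSum q := by
            rw [sfSum_two_le (by omega)]
          rw [this]
          push_cast
          ring
        · rw [getD_set_ne _ _ _ _ (Ne.symm hik1), hget i hi]
          by_cases hik : i ≤ k
          · rw [if_pos hik, if_pos (by omega)]
          · rw [if_neg hik, if_neg (by omega)]

-- ===== VERDICT (by name: the statement is the Claim_ definition above) =====
theorem twoKeysKeyboard650_spec : Claim_equal_twoKeysKeyboard650 := by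
  intro n _ hpre
  have hn1 : 1 ≤ n := hpre
  have hn : n = ((n.toNat : Nat) : Int) := by omega
  rw [Spec_twoKeysKeyboard650, alt_eq, twoKeysKeyboard650]
  conv_lhs => rw [hn]
  have h := (dp_inv n.toNat (by omega) n.toNat (by omega) (le_refl _)).2 n.toNat (le_refl _)
  rw [PySem.List.pyGetD_natCast, h, if_pos (le_refl _)]
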